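-- pv_equiv track=rewrite | github.com/bashbash96/InterviewPreparation | LeetCode/googleOA.py | computeCutCombination
-- ===== SOURCE A (Python) =====
-- def canWeCut(matrix, i, pattern):
--     if pattern == 'hor':
--         upperPiece = matrix[:i]
--         lowerPiece = matrix[i:]
--
--         if any([any(lst) for lst in upperPiece]) and any([any(lst) for lst in lowerPiece]):
--             return True
--         else:
--             return False
--
--     elif pattern == 'ver':
--         # leftPiece
--         isLeftHaveStraw, isRightHaveStraw = False, False
--         for i_index in range(len(matrix)):
--             for j_index in range(i):
--                 if matrix[i_index][j_index]:
--                     isLeftHaveStraw = True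
--                     break
--
--             if isLeftHaveStraw:
--                 break
--
--         for i_index in range(len(matrix)):
--             for j_index in range(i, len(matrix[0])):
--                 if matrix[i_index][j_index]:
--                     isRightHaveStraw = True
--                     break
--
--             if isRightHaveStraw:
--                 break
--
--         if isLeftHaveStraw and isRightHaveStraw:
--             return True
--         else:
--             return False
--     else:
--         pass
--
-- def computeCutCombination(matrix, num_cuts):
--     if num_cuts == 0: return 1
--
--     num_combinations = 0
--     for i in range(1, len(matrix)):
--         if canWeCut(matrix, i, 'hor'):
--             num_combinations += computeCutCombination(matrix[i:], num_cuts - 1)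
--
--     for j in range(1, len(matrix[0])):
--         if canWeCut(matrix, j, 'ver'):
--             matrix_ = [row[j:] for row in matrix]
--             num_combinations += computeCutCombination(matrix_, num_cuts - 1)
--
--     return num_combinations
-- ===== SOURCE B (Python) =====
-- def _has_straw(matrix, t, l, b, r):
--     for i in range(t, b):
--         for j in range(l, r):
--             if matrix[i][j]:
--                 return True
--     return False
--
--
-- def computeCutCombination(matrix, num_cuts):
--     if num_cuts == 0:
--         return 1
--     if num_cuts < 0:
--         return 0
--     R = len(matrix)
--     C = len(matrix[0]) if matrix else 0
--     if C == 0: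
--         return 0
--     if num_cuts > R + C - 2:
--         # every cut removes at least one row or column of the remaining piece,
--         # so no sequence of more than (R-1)+(C-1) cuts exists
--         return 0
--     # table[t][l] = number of ways to make c cuts on the submatrix with the
--     # top t rows and left l columns peeled off; iterate the recurrence
--     # bottom-up num_cuts times instead of recursing on sliced copies.
--     table = [[1] * C for _ in range(R)]
--     for _ in range(num_cuts):
--         table = [[
--             sum(table[i][l] for i in range(t + 1, R)
--                 if _has_straw(matrix, t, l, i, C) and _has_straw(matrix, i, l, R, C))
--             + sum(table[t][j] for j in range(l + 1, C)
--                   if _has_straw(matrix, t, l, R, j) and _has_straw(matrix, t, j, R, C))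
--             for l in range(C)] for t in range(R)]
--     return table[0][0]
-- ===== Notes on version B (the rewrite author's own statement) =====
-- stated objective: faster
-- what changed: Replaces A's top-down recursion on sliced matrix copies (exponential in num_cuts) by a bottom-up dynamic program over (top,left) offsets: a table indexed by the peeled-off row/column counts is iterated num_cuts times, and emptiness is tested on regions of the original matrix instead of on slices.
-- outside the precondition, e.g. on computeCutCombination([[1], [0, 1]], 1): A returns 1, B returns 0; on computeCutCombination([[0, 1], [1]], 1): A returns 2, B raises IndexError
import Mathlib
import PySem

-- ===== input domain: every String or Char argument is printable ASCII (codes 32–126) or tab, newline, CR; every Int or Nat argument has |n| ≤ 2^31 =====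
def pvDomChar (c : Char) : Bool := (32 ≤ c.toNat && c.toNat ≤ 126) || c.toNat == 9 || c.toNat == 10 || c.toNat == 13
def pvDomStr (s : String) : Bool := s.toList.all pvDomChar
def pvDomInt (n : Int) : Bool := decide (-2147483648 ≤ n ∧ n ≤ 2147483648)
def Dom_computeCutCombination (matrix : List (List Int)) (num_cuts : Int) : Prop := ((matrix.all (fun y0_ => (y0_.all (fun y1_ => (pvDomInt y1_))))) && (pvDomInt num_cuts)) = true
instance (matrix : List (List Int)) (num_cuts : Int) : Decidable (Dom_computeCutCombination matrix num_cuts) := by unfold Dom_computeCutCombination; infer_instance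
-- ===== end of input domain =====

-- B replaces A's exponential top-down recursion on sliced matrix copies by a bottom-up
-- dynamic program over (top,left) offsets iterated num_cuts times (objective: faster).


-- ===== PORT A =====
-- canWeCut(matrix, i, pattern); the loops with break are the short-circuiting `any`;
-- matrix[i_index][j_index] / matrix[0] are pyGetD/headD (in range on Pre_'s rectangular
-- nonempty matrices, where Python does not raise).  The final `else: pass` (None) is
-- unreachable for the two pattern literals A uses; the port returns false there.
def canWeCut (matrix : List (List Int)) (i : Int) (pattern : String) : Bool :=
  if pattern = "hor" then
    let upperPiece := PySem.List.slice matrix none (some i)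
    let lowerPiece := PySem.List.slice matrix (some i) none
    (upperPiece.any fun lst => lst.any (fun x => x != 0)) &&
      (lowerPiece.any fun lst => lst.any (fun x => x != 0))
  else if pattern = "ver" then
    let isLeftHaveStraw := (PySem.List.pyRange 0 (matrix.length : Int) 1).any fun i_index =>
      (PySem.List.pyRange 0 i 1).any fun j_index =>
        PySem.List.pyGetD (PySem.List.pyGetD matrix i_index []) j_index 0 != 0
    let isRightHaveStraw := (PySem.List.pyRange 0 (matrix.length : Int) 1).any fun i_index =>
      (PySem.List.pyRange i (((matrix.headD []).length : Nat) : Int) 1).any fun j_index =>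
        PySem.List.pyGetD (PySem.List.pyGetD matrix i_index []) j_index 0 != 0
    isLeftHaveStraw && isRightHaveStraw
  else false

-- termination measure for A's recursion: every recursive call strictly shrinks the matrix
def pvMu (m : List (List Int)) : Nat := (m.map fun r => r.length + 1).sum

theorem pvMu_drop_le (m : List (List Int)) (k : Nat) : pvMu (m.drop k) ≤ pvMu m := by
  apply List.Sublist.sum_le_sum ((List.drop_sublist k m).map _)
  intro a ha; positivity

theorem pvMu_drop_lt (m : List (List Int)) (k : Nat) (hk : 1 ≤ k) (hm : m ≠ []) :
    pvMu (m.drop k) < pvMu m := by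
  cases m with
  | nil => exact absurd rfl hm
  | cons r rest =>
    cases k with
    | zero => omega
    | succ k =>
      have h := pvMu_drop_le rest k
      simp only [List.drop_succ_cons, pvMu, List.map_cons, List.sum_cons] at *
      omega

theorem pvMu_mapdrop_lt (m : List (List Int)) (k : Nat) (hk : 1 ≤ k)
    (h2 : k < (m.headD []).length) : pvMu (m.map fun r => r.drop k) < pvMu m := by
  cases m with
  | nil => simp at h2
  | cons r rest =>
    simp only [List.headD_cons] at h2
    simp only [pvMu, List.map_cons, List.map_map, List.sum_cons]
    have h1 : (r.drop k).length + 1 < r.length + 1 := by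
      simp [List.length_drop]; omega
    have h3 : (rest.map ((fun r : List Int => r.length + 1) ∘ fun r => r.drop k)).sum ≤
        (rest.map fun r : List Int => r.length + 1).sum := by
      apply List.sum_le_sum
      intro a ha; simp [List.length_drop]
    omega

def computeCutCombination (matrix : List (List Int)) (num_cuts : Int) : Int :=
  if num_cuts = 0 then 1
  else
    -- for i in range(1, len(matrix)): if canWeCut(...,'hor'): num_combinations += rec(matrix[i:], ...)
    let afterHor := (PySem.List.pyRange 1 (matrix.length : Int) 1).attach.foldl
      (fun acc p =>
        if canWeCut matrix p.1 "hor" then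
          acc + computeCutCombination (PySem.List.slice matrix (some p.1) none) (num_cuts - 1)
        else acc) 0
    -- for j in range(1, len(matrix[0])): if canWeCut(...,'ver'): matrix_ = [row[j:] ...]; += rec(matrix_, ...)
    (PySem.List.pyRange 1 (((matrix.headD []).length : Nat) : Int) 1).attach.foldl
      (fun acc p =>
        if canWeCut matrix p.1 "ver" then
          acc + computeCutCombination
            (matrix.map fun row => PySem.List.slice row (some p.1) none) (num_cuts - 1)
        else acc) afterHor
termination_by pvMu matrix
decreasing_by
  · have hm := (PySem.List.mem_pyRange_one.mp p.2)
    rw [PySem.List.slice_from matrix (by omega)]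
    exact pvMu_drop_lt _ _ (by omega) (by rintro rfl; simp at hm; omega)
  · have hm := (PySem.List.mem_pyRange_one.mp p.2)
    have hsl : ∀ row : List Int, PySem.List.slice row (some p.1) none = row.drop p.1.toNat :=
      fun row => PySem.List.slice_from row (by omega)
    simp only [hsl]
    have hat : (List.map (fun (x : {x // x ∈ matrix}) => List.drop (p.1).toNat x.1) matrix.attach)
        = matrix.map (fun r => List.drop (p.1).toNat r) := by simp
    rw [hat]
    refine pvMu_mapdrop_lt _ _ ?_ ?_ <;> omega

-- ===== PORT B =====
-- _has_straw(matrix, t, l, b, r): the early-returning double loop is `any` over the index ranges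
def hasStraw (matrix : List (List Int)) (t l b r : Nat) : Bool :=
  (List.range' t (b - t)).any fun i =>
    (List.range' l (r - l)).any fun j =>
      (matrix.getD i []).getD j 0 != 0

-- one iteration of the `table = [[ ... ]]` update
def altStep (matrix : List (List Int)) (R C : Nat) (table : List (List Int)) : List (List Int) :=
  (List.range R).map fun t => (List.range C).map fun l =>
    (((List.range' (t + 1) (R - (t + 1))).filter fun i =>
        hasStraw matrix t l i C && hasStraw matrix i l R C).map
      fun i => (table.getD i []).getD l 0).sum
    +
    (((List.range' (l + 1) (C - (l + 1))).filter fun j =>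
        hasStraw matrix t l R j && hasStraw matrix t j R C).map
      fun j => (table.getD t []).getD j 0).sum

def computeCutCombination_alt (matrix : List (List Int)) (num_cuts : Int) : Int :=
  if num_cuts = 0 then 1
  else if num_cuts < 0 then 0
  else
    let R := matrix.length
    let C := (matrix.headD []).length
    if C = 0 then 0
    -- every cut removes at least one row or column, so > (R-1)+(C-1) cuts is impossible
    else if (R : Int) + (C : Int) - 2 < num_cuts then 0
    else
      let final := (altStep matrix R C)^[num_cuts.toNat] (List.replicate R (List.replicate C 1))
      (final.getD 0 []).getD 0 0

-- ===== PRECONDITION & SPEC =====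
-- Pre_ excludes (unless num_cuts == 0, which returns before touching the matrix) the empty
-- matrix, on which A raises IndexError at matrix[0], and ragged (non-rectangular) matrices,
-- on which A either raises IndexError or returns a value driven by its accidental use of the
-- first row's length as the width of every row.
def Pre_computeCutCombination (matrix : List (List Int)) (num_cuts : Int) : Prop :=
  num_cuts = 0 ∨ (matrix ≠ [] ∧ ∀ row ∈ matrix, row.length = (matrix.headD []).length)
instance (matrix : List (List Int)) (num_cuts : Int) : Decidable (Pre_computeCutCombination matrix num_cuts) := by unfold Pre_computeCutCombination; infer_instance
def pvWitness_computeCutCombination : List (List Int) × Int := ([[1, 0], [0, 1]], 2)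

def Spec_computeCutCombination (matrix : List (List Int)) (num_cuts : Int) (out : Int) : Prop := out = computeCutCombination_alt matrix num_cuts
instance (matrix : List (List Int)) (num_cuts : Int) (out : Int) : Decidable (Spec_computeCutCombination matrix num_cuts out) := by unfold Spec_computeCutCombination; infer_instance

-- ===== CLAIM (what is proved, stated in full; the proofs are below) =====
def Claim_equal_computeCutCombination : Prop := ∀ (matrix : List (List Int)) (num_cuts : Int), Dom_computeCutCombination matrix num_cuts → Pre_computeCutCombination matrix num_cuts → Spec_computeCutCombination matrix num_cuts (computeCutCombination matrix num_cuts)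

-- ===== LEMMAS AND PROOFS =====

def pvP (M : List (List Int)) (i j : Nat) : Prop := (M.getD i []).getD j 0 ≠ 0

theorem hasStraw_iff (M : List (List Int)) (t l b r : Nat) :
    hasStraw M t l b r = true ↔ ∃ i j, t ≤ i ∧ i < b ∧ l ≤ j ∧ j < r ∧ pvP M i j := by
  simp only [hasStraw, List.any_eq_true, List.mem_range'_1, pvP, bne_iff_ne]
  constructor
  · rintro ⟨i, ⟨hi1, hi2⟩, j, ⟨hj1, hj2⟩, h⟩
    exact ⟨i, j, hi1, by omega, hj1, by omega, h⟩
  · rintro ⟨i, j, hi1, hi2, hj1, hj2, h⟩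
    exact ⟨i, ⟨hi1, by omega⟩, j, ⟨hj1, by omega⟩, h⟩

theorem rowAny_iff (row : List Int) (l : Nat) :
    (row.drop l).any (fun x => x != 0) = true ↔
      ∃ p, l ≤ p ∧ p < row.length ∧ row.getD p 0 ≠ 0 := by
  simp only [List.any_eq_true, bne_iff_ne, List.mem_iff_getElem]
  constructor
  · rintro ⟨x, ⟨q, hq, hx⟩, hne⟩
    rw [List.getElem_drop] at hx
    refine ⟨l + q, by omega, by simp [List.length_drop] at hq; omega, ?_⟩
    rw [List.getD_eq_getElem _ _ (by simp at hq; omega)]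
    rw [hx]; exact hne
  · rintro ⟨p, hp1, hp2, hne⟩
    refine ⟨row[p], ⟨p - l, by simp; omega, ?_⟩, ?_⟩
    · rw [List.getElem_drop]; congr 1; omega
    · rw [List.getD_eq_getElem _ _ hp2] at hne; exact hne

theorem rowsAny_iff (M : List (List Int)) (a n l : Nat) :
    (((M.drop a).take n).map (List.drop l)).any (fun lst => lst.any (fun x => x != 0)) = true ↔
      ∃ i, a ≤ i ∧ i < a + n ∧ i < M.length ∧
        ∃ p, l ≤ p ∧ p < (M.getD i []).length ∧ pvP M i p := by
  simp only [List.any_eq_true, List.mem_map]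
  constructor
  · rintro ⟨lst, ⟨row, hrow, rfl⟩, h⟩
    rw [List.mem_iff_getElem] at hrow
    obtain ⟨q, hq, hrow⟩ := hrow
    simp only [List.length_take, List.length_drop, lt_inf_iff] at hq
    rw [List.getElem_take, List.getElem_drop] at hrow
    rw [← List.any_eq_true] at h
    rw [rowAny_iff] at h
    obtain ⟨p, hp1, hp2, hne⟩ := h
    have hrow' : M.getD (a + q) [] = row := by
      rw [List.getD_eq_getElem _ _ (by omega)]; exact hrow
    refine ⟨a + q, by omega, by omega, by omega, p, hp1, ?_, ?_⟩
    · rw [hrow']; exact hp2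
    · unfold pvP; rw [hrow']; exact hne
  · rintro ⟨i, hi1, hi2, hi3, p, hp1, hp2, hne⟩
    refine ⟨(M.getD i []).drop l, ⟨M.getD i [], ?_, rfl⟩, ?_⟩
    · rw [List.mem_iff_getElem]
      refine ⟨i - a, ?_, ?_⟩
      · simp only [List.length_take, List.length_drop, lt_inf_iff]; omega
      · rw [List.getElem_take, List.getElem_drop, List.getD_eq_getElem _ _ hi3]
        congr 1; omega
    · rw [← List.any_eq_true, rowAny_iff]
      exact ⟨p, hp1, hp2, hne⟩
def subM (M : List (List Int)) (t l : Nat) : List (List Int) := (M.drop t).map (List.drop l)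

theorem getD_len (M : List (List Int)) (C : Nat) (hrect : ∀ row ∈ M, row.length = C)
    (i : Nat) (hi : i < M.length) : (M.getD i []).length = C := by
  rw [List.getD_eq_getElem _ _ hi]
  exact hrect _ (List.getElem_mem hi)

theorem canHor (M : List (List Int)) (C : Nat) (hrect : ∀ row ∈ M, row.length = C)
    (t l : Nat) (i : Int) (hi1 : 1 ≤ i) (_hi2 : i < ((M.length - t : Nat) : Int)) :
    canWeCut (subM M t l) i "hor" =
      (hasStraw M t l (t + i.toNat) C && hasStraw M (t + i.toNat) l M.length C) := by
  rw [Bool.eq_iff_iff]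
  simp only [canWeCut, if_true, Bool.and_eq_true]
  rw [PySem.List.slice_to _ (by omega), PySem.List.slice_from _ (by omega)]
  unfold subM
  rw [← List.map_take, ← List.map_drop, List.drop_drop]
  have htk : M.drop (t + i.toNat) = (M.drop (t + i.toNat)).take (M.length - (t + i.toNat)) := by
    rw [List.take_of_length_le (by simp)]
  rw [htk, rowsAny_iff, rowsAny_iff, hasStraw_iff, hasStraw_iff]
  constructor
  · rintro ⟨⟨i1, h1, h2, h3, p1, hp1, hp2, hp3⟩, ⟨i2, g1, g2, g3, q1, hq1, hq2, hq3⟩⟩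
    rw [getD_len M C hrect _ h3] at hp2
    rw [getD_len M C hrect _ g3] at hq2
    exact ⟨⟨i1, p1, h1, by omega, hp1, hp2, hp3⟩, ⟨i2, q1, by omega, by omega, hq1, hq2, hq3⟩⟩
  · rintro ⟨⟨i1, p1, h1, h2, hp1, hp2, hp3⟩, ⟨i2, q1, g1, g2, hq1, hq2, hq3⟩⟩
    refine ⟨⟨i1, h1, by omega, by omega, p1, hp1, ?_, hp3⟩,
            ⟨i2, by omega, by omega, by omega, q1, hq1, ?_, hq3⟩⟩
    · rw [getD_len M C hrect _ (by omega)]; omega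
    · rw [getD_len M C hrect _ (by omega)]; omega
theorem chain_eq (M : List (List Int)) (C : Nat) (hrect : ∀ row ∈ M, row.length = C)
    (t l : Nat) (ii jj : Int) (h1 : 0 ≤ ii) (h2 : ii < ((M.length - t : Nat) : Int))
    (h3 : 0 ≤ jj) (h4 : jj < ((C - l : Nat) : Int)) :
    PySem.List.pyGetD (PySem.List.pyGetD (subM M t l) ii []) jj 0 =
      (M.getD (t + ii.toNat) []).getD (l + jj.toNat) 0 := by
  have hlen : (subM M t l).length = M.length - t := by simp [subM]
  rw [PySem.List.pyGetD_eq_getElem _ _ h1 (by rw [hlen]; omega)]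
  have hgm : (subM M t l)[ii.toNat]'(by rw [hlen]; omega) =
      (M[t + ii.toNat]'(by omega)).drop l := by
    simp only [subM, List.getElem_map, List.getElem_drop]
  rw [hgm]
  have hrl : (M[t + ii.toNat]'(by omega)).length = C :=
    hrect _ (List.getElem_mem (by omega))
  rw [PySem.List.pyGetD_eq_getElem _ _ h3 (by simp [List.length_drop, hrl]; omega)]
  rw [List.getElem_drop]
  rw [List.getD_eq_getElem _ _ (by omega : t + ii.toNat < M.length),
      List.getD_eq_getElem _ _ (by rw [hrl]; omega : l + jj.toNat < _)]

theorem canVer (M : List (List Int)) (C : Nat) (hrect : ∀ row ∈ M, row.length = C)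
    (t l : Nat) (ht : t < M.length) (hl : l ≤ C) (j : Int) (hj1 : 1 ≤ j)
    (hj2 : j < ((C - l : Nat) : Int)) :
    canWeCut (subM M t l) j "ver" =
      (hasStraw M t l M.length (l + j.toNat) && hasStraw M t (l + j.toNat) M.length C) := by
  have hlen : (subM M t l).length = M.length - t := by simp [subM]
  have hhead : ((subM M t l).headD []).length = C - l := by
    have h0 : (subM M t l).headD [] = (subM M t l).getD 0 [] := by
      cases hsm : subM M t l <;> simp
    rw [h0, List.getD_eq_getElem _ _ (by rw [hlen]; omega)]
    have : (subM M t l)[0]'(by rw [hlen]; omega) = (M[t]'ht).drop l := by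
      simp only [subM, List.getElem_map, List.getElem_drop]
      congr 1
    rw [this, List.length_drop, hrect _ (List.getElem_mem ht)]
  rw [Bool.eq_iff_iff]
  unfold canWeCut
  rw [if_neg (by decide : ¬ ("ver" = "hor")), if_pos rfl]
  simp only [hlen, hhead, Bool.and_eq_true, List.any_eq_true,
    PySem.List.mem_pyRange_one, bne_iff_ne]
  rw [hasStraw_iff, hasStraw_iff]
  constructor
  · rintro ⟨⟨ii, ⟨hii1, hii2⟩, jj, ⟨hjj1, hjj2⟩, hne⟩, ⟨ii', ⟨hii1', hii2'⟩, jj', ⟨hjj1', hjj2'⟩, hne'⟩⟩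
    rw [chain_eq M C hrect t l ii jj hii1 hii2 hjj1 (by omega)] at hne
    rw [chain_eq M C hrect t l ii' jj' hii1' hii2' (by omega) hjj2'] at hne'
    exact ⟨⟨t + ii.toNat, l + jj.toNat, by omega, by omega, by omega, by omega, hne⟩,
           ⟨t + ii'.toNat, l + jj'.toNat, by omega, by omega, by omega, by omega, hne'⟩⟩
  · rintro ⟨⟨i1, j1, h1, h2, h3, h4, hne⟩, ⟨i2, j2, g1, g2, g3, g4, hne'⟩⟩
    refine ⟨⟨(i1 - t : Nat), ⟨by omega, by omega⟩, (j1 - l : Nat), ⟨by omega, by omega⟩, ?_⟩,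
            ⟨(i2 - t : Nat), ⟨by omega, by omega⟩, ((j2 - l : Nat) : Int), ⟨by omega, by omega⟩, ?_⟩⟩
    · rw [chain_eq M C hrect t l _ _ (by omega) (by omega) (by omega) (by omega)]
      have e1 : t + ((i1 - t : Nat) : Int).toNat = i1 := by omega
      have e2 : l + ((j1 - l : Nat) : Int).toNat = j1 := by omega
      rw [e1, e2]; exact hne
    · rw [chain_eq M C hrect t l _ _ (by omega) (by omega) (by omega) (by omega)]
      have e1 : t + ((i2 - t : Nat) : Int).toNat = i2 := by omega
      have e2 : l + ((j2 - l : Nat) : Int).toNat = j2 := by omega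
      rw [e1, e2]; exact hne'
def gS (M : List (List Int)) (R C : Nat) : Nat → Nat → Nat → Int
  | 0, _, _ => 1
  | c + 1, t, l =>
      (((List.range' (t + 1) (R - (t + 1))).filter fun i =>
          hasStraw M t l i C && hasStraw M i l R C).map fun i => gS M R C c i l).sum
      +
      (((List.range' (l + 1) (C - (l + 1))).filter fun j =>
          hasStraw M t l R j && hasStraw M t j R C).map fun j => gS M R C c t j).sum

theorem gtable (M : List (List Int)) (R C : Nat) (k : Nat) :
    (altStep M R C)^[k] (List.replicate R (List.replicate C 1)) =
      (List.range R).map fun t => (List.range C).map fun l => gS M R C k t l := by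
  induction k with
  | zero =>
    simp only [Function.iterate_zero, id_eq, gS]
    simp [List.map_const']
  | succ k ih =>
    rw [Function.iterate_succ_apply', ih]
    unfold altStep
    apply List.map_congr_left
    intro t ht
    rw [List.mem_range] at ht
    apply List.map_congr_left
    intro l hl
    rw [List.mem_range] at hl
    show _ + _ = gS M R C (k + 1) t l
    rw [gS]
    congr 1
    · refine congrArg List.sum ?_
      apply List.map_congr_left
      intro i hi
      have hi' := (List.mem_filter.mp hi).1
      rw [List.mem_range'_1] at hi'
      rw [PySem.List.getD_map_range _ _ _ _ (by omega),
          PySem.List.getD_map_range _ _ _ _ (by omega)]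
    · refine congrArg List.sum ?_
      apply List.map_congr_left
      intro j hj
      have hj' := (List.mem_filter.mp hj).1
      rw [List.mem_range'_1] at hj'
      rw [PySem.List.getD_map_range _ _ _ _ (by omega),
          PySem.List.getD_map_range _ _ _ _ (by omega)]

theorem foldl_if_add {α : Type} (l : List α) (p : α → Bool) (f : α → Int) (a : Int) :
    l.foldl (fun acc x => if p x then acc + f x else acc) a = a + ((l.filter p).map f).sum := by
  induction l generalizing a with
  | nil => simp
  | cons x xs ih =>
    by_cases h : p x <;> simp [h, ih] <;> ring

theorem foldl_attach_if_add {α : Type} (l : List α) (p : α → Bool) (f : α → Int) (a : Int) :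
    l.attach.foldl (fun acc x => if p x.1 then acc + f x.1 else acc) a =
      a + ((l.filter p).map f).sum := by
  rw [List.foldl_attach (f := fun acc x => if p x then acc + f x else acc), foldl_if_add]

theorem subM_zero (M : List (List Int)) : subM M 0 0 = M := by
  unfold subM
  rw [List.drop_zero]
  exact (List.map_congr_left fun r _ => List.drop_zero).trans (List.map_id M)

theorem subM_drop (M : List (List Int)) (t l k : Nat) :
    (subM M t l).drop k = subM M (t + k) l := by
  unfold subM
  rw [← List.map_drop, List.drop_drop]

theorem subM_mapdrop (M : List (List Int)) (t l k : Nat) :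
    (subM M t l).map (List.drop k) = subM M t (l + k) := by
  unfold subM
  rw [List.map_map]
  apply List.map_congr_left
  intro r _
  simp only [Function.comp_apply, List.drop_drop]

theorem subM_len (M : List (List Int)) (t l : Nat) :
    (subM M t l).length = M.length - t := by simp [subM]

theorem subM_head_len (M : List (List Int)) (C : Nat) (hrect : ∀ row ∈ M, row.length = C)
    (t l : Nat) (ht : t < M.length) : ((subM M t l).headD []).length = C - l := by
  have h0 : (subM M t l).headD [] = (subM M t l).getD 0 [] := by
    cases hsm : subM M t l <;> simp
  rw [h0, List.getD_eq_getElem _ _ (by rw [subM_len]; omega)]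
  have : (subM M t l)[0]'(by rw [subM_len]; omega) = (M[t]'ht).drop l := by
    simp only [subM, List.getElem_map, List.getElem_drop]
    norm_num
  rw [this, List.length_drop, hrect _ (List.getElem_mem ht)]

theorem A_eq_g (M : List (List Int)) (C : Nat)
    (hrect : ∀ row ∈ M, row.length = C) :
    ∀ (c t l : Nat), t < M.length → l < C →
      computeCutCombination (subM M t l) ((c : Nat) : Int) = gS M M.length C c t l := by
  intro c
  induction c with
  | zero =>
    intro t l ht hl
    rw [computeCutCombination]
    norm_num [gS]
  | succ c ih =>
    intro t l ht hl
    rw [computeCutCombination]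
    rw [if_neg (by omega)]
    rw [foldl_attach_if_add _ (fun i => canWeCut (subM M t l) i "hor")
      (fun i => computeCutCombination (PySem.List.slice (subM M t l) (some i)) ((((c : Nat) + 1 : Nat) : Int) - 1))]
    rw [foldl_attach_if_add _ (fun j => canWeCut (subM M t l) j "ver")
      (fun j => computeCutCombination ((subM M t l).map fun row => PySem.List.slice row (some j)) ((((c : Nat) + 1 : Nat) : Int) - 1))]
    rw [subM_len, subM_head_len M C hrect t l ht]
    rw [gS]
    rw [zero_add]
    congr 1
    · -- horizontal part
      rw [PySem.List.pyRange_one 1 ((M.length - t : Nat) : Int)]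
      rw [List.filter_map, List.map_map]
      rw [List.range'_eq_map_range, List.filter_map, List.map_map]
      rw [show ((((M.length - t : Nat) : Int) - 1).toNat) = M.length - (t + 1) by omega]
      refine congrArg List.sum ?_
      have hfil : List.filter ((fun i => canWeCut (subM M t l) i "hor") ∘ fun k : Nat => 1 + (k : Int))
            (List.range (M.length - (t + 1))) =
          List.filter ((fun i => hasStraw M t l i C && hasStraw M i l M.length C) ∘ fun k : Nat => t + 1 + k)
            (List.range (M.length - (t + 1))) := by
        apply List.filter_congr
        intro k hk
        rw [List.mem_range] at hk
        simp only [Function.comp_apply]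
        rw [canHor M C hrect t l _ (by omega) (by omega)]
        rw [show ((1 : Int) + (k : Nat)).toNat = 1 + k by omega,
            show t + (1 + k) = t + 1 + k by omega]
      rw [hfil]
      apply List.map_congr_left
      intro k hk
      have hk' := (List.mem_filter.mp hk).1
      rw [List.mem_range] at hk'
      simp only [Function.comp_apply]
      rw [PySem.List.slice_from _ (by omega)]
      rw [show ((1 : Int) + (k : Nat)).toNat = 1 + k by omega]
      rw [subM_drop, show t + (1 + k) = t + 1 + k by omega]
      rw [show (((c : Nat) + 1 : Nat) : Int) - 1 = ((c : Nat) : Int) by omega]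
      exact ih (t + 1 + k) l (by omega) hl
    · -- vertical part
      rw [PySem.List.pyRange_one 1 ((C - l : Nat) : Int)]
      rw [List.filter_map, List.map_map]
      rw [List.range'_eq_map_range, List.filter_map, List.map_map]
      rw [show ((((C - l : Nat) : Int) - 1).toNat) = C - (l + 1) by omega]
      refine congrArg List.sum ?_
      have hfil : List.filter ((fun j => canWeCut (subM M t l) j "ver") ∘ fun k : Nat => 1 + (k : Int))
            (List.range (C - (l + 1))) =
          List.filter ((fun j => hasStraw M t l M.length j && hasStraw M t j M.length C) ∘ fun k : Nat => l + 1 + k)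
            (List.range (C - (l + 1))) := by
        apply List.filter_congr
        intro k hk
        rw [List.mem_range] at hk
        simp only [Function.comp_apply]
        rw [canVer M C hrect t l ht (by omega) _ (by omega) (by omega)]
        rw [show ((1 : Int) + (k : Nat)).toNat = 1 + k by omega,
            show l + (1 + k) = l + 1 + k by omega]
      rw [hfil]
      apply List.map_congr_left
      intro k hk
      have hk' := (List.mem_filter.mp hk).1
      rw [List.mem_range] at hk'
      simp only [Function.comp_apply]
      have hsl : ((subM M t l).map fun row => PySem.List.slice row (some (1 + (k : Nat) : Int))) =
          subM M t (l + 1 + k) := by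
        have : ∀ row : List Int, PySem.List.slice row (some (1 + (k : Nat) : Int)) = row.drop (1 + k) := by
          intro row
          rw [PySem.List.slice_from _ (by omega)]
          congr 1
        simp only [this]
        rw [subM_mapdrop, show l + (1 + k) = l + 1 + k by omega]
      rw [hsl]
      rw [show (((c : Nat) + 1 : Nat) : Int) - 1 = ((c : Nat) : Int) by omega]
      exact ih t (l + 1 + k) ht (by omega)

theorem A_neg : ∀ (n : Nat) (m : List (List Int)) (nc : Int), pvMu m < n → nc < 0 →
    computeCutCombination m nc = 0 := by
  intro n
  induction n with
  | zero => intro m nc hm; omega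
  | succ n ih =>
    intro m nc hm hnc
    rw [computeCutCombination, if_neg (by omega)]
    rw [foldl_attach_if_add _ (fun i => canWeCut m i "hor")
      (fun i => computeCutCombination (PySem.List.slice m (some i)) (nc - 1))]
    rw [foldl_attach_if_add _ (fun j => canWeCut m j "ver")
      (fun j => computeCutCombination (m.map fun row => PySem.List.slice row (some j)) (nc - 1))]
    have h1 : ∀ i ∈ (PySem.List.pyRange 1 (m.length : Int)).filter (fun i => canWeCut m i "hor"),
        computeCutCombination (PySem.List.slice m (some i)) (nc - 1) = 0 := by
      intro i hi
      have hb := PySem.List.mem_pyRange_one.mp (List.mem_filter.mp hi).1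
      rw [PySem.List.slice_from _ (by omega)]
      refine ih _ _ ?_ (by omega)
      have := pvMu_drop_lt m i.toNat (by omega) (by rintro rfl; simp at hb; omega)
      omega
    have h2 : ∀ j ∈ (PySem.List.pyRange 1 ((m.headD []).length : Int)).filter (fun j => canWeCut m j "ver"),
        computeCutCombination (m.map fun row => PySem.List.slice row (some j)) (nc - 1) = 0 := by
      intro j hj
      have hb := PySem.List.mem_pyRange_one.mp (List.mem_filter.mp hj).1
      have hsl : ∀ row : List Int, PySem.List.slice row (some j) = row.drop j.toNat :=
        fun row => PySem.List.slice_from row (by omega)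
      simp only [hsl]
      refine ih _ _ ?_ (by omega)
      have := pvMu_mapdrop_lt m j.toNat (by omega) (by omega)
      omega
    rw [List.map_congr_left h1, List.map_congr_left h2]
    simp

theorem A_zero_width (m : List (List Int)) (h0 : ∀ row ∈ m, row.length = 0)
    (nc : Int) (h : nc ≠ 0) : computeCutCombination m nc = 0 := by
  have hcut : ∀ i : Int, canWeCut m i "hor" = false := by
    intro i
    simp only [canWeCut, if_true]
    have hup : (PySem.List.slice m none (some i)).any (fun lst => lst.any (fun x => x != 0)) = false := by
      rw [List.any_eq_false]
      intro lst hl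
      have hm := PySem.List.mem_of_mem_slice _ _ _ hl
      have : lst = [] := List.eq_nil_of_length_eq_zero (h0 lst hm)
      subst this
      simp
    rw [hup, Bool.false_and]
  have hh : (m.headD []).length = 0 := by
    cases m with
    | nil => simp
    | cons r rest => exact h0 r (by simp)
  rw [computeCutCombination, if_neg h]
  rw [foldl_attach_if_add _ (fun i => canWeCut m i "hor")
    (fun i => computeCutCombination (PySem.List.slice m (some i)) (nc - 1))]
  rw [foldl_attach_if_add _ (fun j => canWeCut m j "ver")
    (fun j => computeCutCombination (m.map fun row => PySem.List.slice row (some j)) (nc - 1))]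
  have hf : List.filter (fun i => canWeCut m i "hor") (PySem.List.pyRange 1 (m.length : Int)) = [] := by
    rw [List.filter_eq_nil_iff]
    intro i _
    simp [hcut i]
  rw [hf, hh]
  rw [show ((0 : Nat) : Int) = 0 from rfl]
  rw [PySem.List.pyRange_one_eq_nil (by norm_num)]
  simp

theorem gS_zero (M : List (List Int)) (R C : Nat) :
    ∀ (c t l : Nat), (R - 1 - t) + (C - 1 - l) < c → gS M R C c t l = 0 := by
  intro c
  induction c with
  | zero => intro t l h; omega
  | succ c ih =>
    intro t l h
    rw [gS]
    have h1 : ∀ i ∈ (List.range' (t + 1) (R - (t + 1))).filter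
        (fun i => hasStraw M t l i C && hasStraw M i l R C), gS M R C c i l = 0 := by
      intro i hi
      have hm := (List.mem_filter.mp hi).1
      rw [List.mem_range'_1] at hm
      exact ih i l (by omega)
    have h2 : ∀ j ∈ (List.range' (l + 1) (C - (l + 1))).filter
        (fun j => hasStraw M t l R j && hasStraw M t j R C), gS M R C c t j = 0 := by
      intro j hj
      have hm := (List.mem_filter.mp hj).1
      rw [List.mem_range'_1] at hm
      exact ih t j (by omega)
    rw [List.map_congr_left h1, List.map_congr_left h2]
    simp

theorem main_equiv (matrix : List (List Int)) (num_cuts : Int)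
    (hpre : Pre_computeCutCombination matrix num_cuts) :
    computeCutCombination matrix num_cuts = computeCutCombination_alt matrix num_cuts := by
  by_cases h0 : num_cuts = 0
  · subst h0
    rw [computeCutCombination, if_pos rfl]
    rw [computeCutCombination_alt, if_pos rfl]
  · obtain ⟨hne, hrect⟩ : matrix ≠ [] ∧ ∀ row ∈ matrix, row.length = (matrix.headD []).length := by
      rcases hpre with h | h
      · exact absurd h h0
      · exact h
    set C := (matrix.headD []).length with hC
    by_cases hneg : num_cuts < 0
    · rw [A_neg (pvMu matrix + 1) matrix num_cuts (by omega) hneg]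
      rw [computeCutCombination_alt, if_neg h0, if_pos hneg]
    · -- num_cuts > 0
      by_cases hCz : C = 0
      · rw [A_zero_width matrix (by intro row hr; rw [hrect row hr]; exact hCz) num_cuts h0]
        rw [computeCutCombination_alt, if_neg h0, if_neg hneg]
        rw [if_pos (by exact hCz)]
      · have hR : 0 < matrix.length := List.length_pos_iff.mpr hne
        have hCpos : 0 < C := by omega
        have hcast : ((num_cuts.toNat : Nat) : Int) = num_cuts := Int.toNat_of_nonneg (by omega)
        have hA : computeCutCombination matrix num_cuts =
            gS matrix matrix.length C num_cuts.toNat 0 0 := by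
          conv_lhs => rw [← hcast, ← subM_zero matrix]
          exact A_eq_g matrix C (by intro row hr; rw [hrect row hr, hC]) num_cuts.toNat 0 0
            hR hCpos
        rw [hA]
        rw [computeCutCombination_alt, if_neg h0, if_neg hneg]
        rw [if_neg (by exact hCz)]
        by_cases hbig : ((matrix.length : Int) + (C : Int) - 2 < num_cuts)
        · rw [if_pos hbig]
          exact gS_zero matrix matrix.length C num_cuts.toNat 0 0 (by omega)
        · rw [if_neg hbig]
          show _ = (((altStep matrix matrix.length C)^[num_cuts.toNat]
              (List.replicate matrix.length (List.replicate C 1))).getD 0 []).getD 0 0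
          rw [gtable matrix matrix.length C num_cuts.toNat]
          rw [PySem.List.getD_map_range _ _ _ _ hR, PySem.List.getD_map_range _ _ _ _ hCpos]

-- ===== VERDICT (by name: the statement is the Claim_ definition above) =====
theorem computeCutCombination_spec : Claim_equal_computeCutCombination := by
  intro matrix num_cuts _ hpre
  exact main_equiv matrix num_cuts hpre
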